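-- pv_equiv track=rewrite | github.com/Amanuel94/CF-Solutions | A_Sereja_and_Dima.py | func
-- ===== SOURCE A (Python) =====
-- def func(cards, turn, score, l, r):
--
--     if l > r:
--         return score
--
--     if cards[l] >= cards[r]:
--         score[turn]+=cards[l]
--         l+=1
--     else:
--         score[turn]+=cards[r]
--         r-=1
--     return func(cards, 1-turn, score, l, r)
-- ===== SOURCE B (Python) =====
-- def func(cards, turn, score, l, r):
--     # Selection pass: accumulate the picked values into parity sums, then
--     # apply the two batched updates to score (mutated in place, like A).
--     s_even = 0
--     s_odd = 0
--     k = 0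
--     while l <= r:
--         if cards[l] >= cards[r]:
--             p = cards[l]
--             l += 1
--         else:
--             p = cards[r]
--             r -= 1
--         if k % 2 == 0:
--             s_even += p
--         else:
--             s_odd += p
--         k += 1
--     if k > 0:
--         score[turn] += s_even
--     if k > 1:
--         score[1 - turn] += s_odd
--     return score
-- ===== Notes on version B (the rewrite author's own statement) =====
-- stated objective: alternative
-- what changed: A recursively alternates turns, mutating score[turn] once per picked card; B replaces the recursion by a single selection loop that accumulates the picked values into two parity sums (even/odd pick index) and a counter, then applies at most two batched in-place updates to score.
import Mathlib
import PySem

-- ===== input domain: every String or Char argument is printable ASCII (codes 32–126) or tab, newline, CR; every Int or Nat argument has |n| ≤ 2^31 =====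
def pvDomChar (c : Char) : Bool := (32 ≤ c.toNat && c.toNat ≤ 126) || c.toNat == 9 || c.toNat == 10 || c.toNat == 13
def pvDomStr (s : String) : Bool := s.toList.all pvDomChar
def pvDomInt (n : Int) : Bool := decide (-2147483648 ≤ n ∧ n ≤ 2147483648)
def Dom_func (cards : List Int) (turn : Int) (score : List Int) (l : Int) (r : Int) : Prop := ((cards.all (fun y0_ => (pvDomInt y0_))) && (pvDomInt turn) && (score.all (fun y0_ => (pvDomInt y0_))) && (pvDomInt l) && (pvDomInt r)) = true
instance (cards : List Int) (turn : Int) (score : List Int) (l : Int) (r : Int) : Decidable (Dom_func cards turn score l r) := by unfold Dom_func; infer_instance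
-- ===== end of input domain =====

-- B replaces A's alternating recursion by one selection loop accumulating parity sums plus
-- two batched score updates; both Pythons mutate `score` in place and end with the same
-- final contents (intermediate states differ), so the equivalence is about the returned list.

-- ===== PORT A =====
def func (cards : List Int) (turn : Int) (score : List Int) (l : Int) (r : Int) : List Int :=
  if _h : l > r then score
  else
    match PySem.List.pyGet? cards l, PySem.List.pyGet? cards r, PySem.List.pyGet? score turn with
    | some cl, some cr, some st =>
      -- score[turn] += … : the get above already raised on a bad index, so the
      -- write is pySetD (= set at the same, already-validated index)
      if cl ≥ cr then func cards (1 - turn) (PySem.List.pySetD score turn (st + cl)) (l + 1) r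
      else func cards (1 - turn) (PySem.List.pySetD score turn (st + cr)) l (r - 1)
    | _, _, _ => score       -- IndexError in Python; outside Pre_func
termination_by (r + 1 - l).toNat
decreasing_by all_goals omega

-- ===== PORT B =====
-- B's while-loop: two pointers, parity sums s_even/s_odd, pick counter k.
def pickLoop (cards : List Int) (l r se so k : Int) : Option (Int × Int × Int) :=
  if _h : l ≤ r then
    match PySem.List.pyGet? cards l, PySem.List.pyGet? cards r with
    | some cl, some cr =>
      if cl ≥ cr then
        if PySem.Int.mod k 2 = 0 then pickLoop cards (l + 1) r (se + cl) so (k + 1)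
        else pickLoop cards (l + 1) r se (so + cl) (k + 1)
      else
        if PySem.Int.mod k 2 = 0 then pickLoop cards l (r - 1) (se + cr) so (k + 1)
        else pickLoop cards l (r - 1) se (so + cr) (k + 1)
    | some _, none => none   -- IndexError in Python; outside Pre_func
    | none, some _ => none   -- IndexError in Python; outside Pre_func
    | none, none => none     -- IndexError in Python; outside Pre_func
  else some (se, so, k)
termination_by (r + 1 - l).toNat
decreasing_by all_goals omega

-- B's two batched updates: score[turn] += s_even (if k > 0), score[1-turn] += s_odd (if k > 1).
def finish1 (score : List Int) (turn se k : Int) : List Int :=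
  if k > 0 then
    match PySem.List.pyGet? score turn with
    | some st => PySem.List.pySetD score turn (st + se)
    | none => score         -- IndexError in Python; outside Pre_func
  else score

def finish2 (s1 : List Int) (turn so k : Int) : List Int :=
  if k > 1 then
    match PySem.List.pyGet? s1 (1 - turn) with
    | some su => PySem.List.pySetD s1 (1 - turn) (su + so)
    | none => s1            -- IndexError in Python; outside Pre_func
  else s1

def finish (score : List Int) (turn se so k : Int) : List Int :=
  finish2 (finish1 score turn se k) turn so k

def func_alt (cards : List Int) (turn : Int) (score : List Int) (l : Int) (r : Int) : List Int :=
  match pickLoop cards l r 0 0 0 with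
  | none => score            -- IndexError in Python; outside Pre_func
  | some (se, so, k) => finish score turn se so k

-- ===== PRECONDITION & SPEC =====
-- Exactly the inputs on which the Python A returns (no IndexError): either the loop body never
-- runs (l > r), or all card accesses and every score[turn] access of the alternation are valid
-- Python indices (negative wrap-around included; score[1-turn] is touched only when r ≠ l).
def Pre_func (cards : List Int) (turn : Int) (score : List Int) (l : Int) (r : Int) : Prop :=
  l > r ∨ (-(cards.length : Int) ≤ l ∧ r < (cards.length : Int) ∧
    PySem.Raise.InRange score.length turn ∧
    (r = l ∨ PySem.Raise.InRange score.length (1 - turn)))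
instance (cards : List Int) (turn : Int) (score : List Int) (l : Int) (r : Int) : Decidable (Pre_func cards turn score l r) := by unfold Pre_func; infer_instance

def pvWitness_func : List Int × Int × List Int × Int × Int := ([3, 1, 2, 4], 0, [0, 0], 0, 3)

def Spec_func (cards : List Int) (turn : Int) (score : List Int) (l : Int) (r : Int) (out : List Int) : Prop := out = func_alt cards turn score l r
instance (cards : List Int) (turn : Int) (score : List Int) (l : Int) (r : Int) (out : List Int) : Decidable (Spec_func cards turn score l r out) := by unfold Spec_func; infer_instance

-- ===== CLAIM (what is proved, stated in full; the proofs are below) =====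
def Claim_equal_func : Prop := ∀ (cards : List Int) (turn : Int) (score : List Int) (l : Int) (r : Int), Dom_func cards turn score l r → Pre_func cards turn score l r → Spec_func cards turn score l r (func cards turn score l r)

-- ===== LEMMAS AND PROOFS =====

-- Proof-side description of the sequence of picked cards.
def picks? (cards : List Int) (l r : Int) : Option (List Int) :=
  if _h : l ≤ r then
    match PySem.List.pyGet? cards l, PySem.List.pyGet? cards r with
    | some cl, some cr =>
      if cl ≥ cr then (picks? cards (l + 1) r).map (cl :: ·)
      else (picks? cards l (r - 1)).map (cr :: ·)
    | _, _ => none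
  else some []
termination_by (r + 1 - l).toNat
decreasing_by all_goals omega

-- psum true = sum at even positions, psum false = sum at odd positions.
def psum : Bool → List Int → Int
  | _, [] => 0
  | true, p :: ps => p + psum false ps
  | false, _ :: ps => psum true ps

-- A's score-updating scheme, abstracted over the pick sequence.
def applyAlt (score : List Int) (turn : Int) : List Int → List Int
  | [] => score
  | p :: ps =>
      applyAlt (PySem.List.pySetD score turn (PySem.List.pyGetD score turn 0 + p)) (1 - turn) ps

theorem idx_ok {n : Nat} {i : Int} (h : PySem.Raise.InRange n i) :
    ∃ k : Nat, PySem.List.pyIdx? n i = some k ∧ k < n := by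
  obtain ⟨h1, h2⟩ := h
  unfold PySem.List.pyIdx?
  by_cases h0 : 0 ≤ i
  · rw [if_pos h0, if_pos h2]
    exact ⟨_, rfl, by omega⟩
  · rw [if_neg h0, if_pos h1]
    exact ⟨_, rfl, by omega⟩

theorem pyGet?_eq_some {xs : List Int} {i : Int} {k : Nat}
    (h : PySem.List.pyIdx? xs.length i = some k) (hk : k < xs.length) :
    PySem.List.pyGet? xs i = some (xs.getD k 0) := by
  simp [PySem.List.pyGet?, h, List.getD_eq_getElem?_getD, List.getElem?_eq_getElem hk]

theorem pySet?_eq_some {xs : List Int} {i : Int} {k : Nat} (v : Int)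
    (h : PySem.List.pyIdx? xs.length i = some k) :
    PySem.List.pySet? xs i v = some (xs.set k v) := by
  simp [PySem.List.pySet?, h]

theorem pySetD_eq {xs : List Int} {i : Int} {k : Nat} (v : Int)
    (h : PySem.List.pyIdx? xs.length i = some k) :
    PySem.List.pySetD xs i v = xs.set k v := by
  simp [PySem.List.pySetD, pySet?_eq_some v h]

-- pickLoop computes picks? plus parity bookkeeping.
theorem pickLoop_eq (cards : List Int) : ∀ (N : Nat) (l r se so k : Int), (r + 1 - l).toNat = N →
    pickLoop cards l r se so k = (picks? cards l r).map (fun ps =>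
      if PySem.Int.mod k 2 = 0 then (se + psum true ps, so + psum false ps, k + ps.length)
      else (se + psum false ps, so + psum true ps, k + ps.length)) := by
  intro N
  induction N using Nat.strong_induction_on with
  | _ N ih =>
    intro l r se so k hN
    rw [pickLoop, picks?]
    by_cases hlr : l ≤ r
    · simp only [dif_pos hlr]
      cases hgl : PySem.List.pyGet? cards l with
      | none => cases PySem.List.pyGet? cards r <;> simp
      | some cl =>
        cases hgr : PySem.List.pyGet? cards r with
        | none => simp
        | some cr =>
          have hmod : PySem.Int.mod k 2 = k % 2 := PySem.Int.mod_eq_emod_of_pos (by omega)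
          have hmod1 : PySem.Int.mod (k + 1) 2 = (k + 1) % 2 := PySem.Int.mod_eq_emod_of_pos (by omega)
          by_cases hc : cl ≥ cr
          · simp only [if_pos hc]
            by_cases hk : PySem.Int.mod k 2 = 0
            · have hk1 : ¬ PySem.Int.mod (k + 1) 2 = 0 := by rw [hmod1]; rw [hmod] at hk; omega
              rw [if_pos hk, ih (r + 1 - (l + 1)).toNat (by omega) (l + 1) r (se + cl) so (k + 1) rfl]
              cases picks? cards (l + 1) r with
              | none => simp
              | some ps =>
                simp only [Option.map_some]
                rw [if_neg hk1, if_pos hk]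
                simp only [Option.some.injEq, Prod.mk.injEq, psum]
                refine ⟨?_, ?_, ?_⟩ <;> (try trivial) <;> (push_cast [List.length_cons]; omega)
            · have hk1 : PySem.Int.mod (k + 1) 2 = 0 := by rw [hmod1]; rw [hmod] at hk; omega
              rw [if_neg hk, ih (r + 1 - (l + 1)).toNat (by omega) (l + 1) r se (so + cl) (k + 1) rfl]
              cases picks? cards (l + 1) r with
              | none => simp
              | some ps =>
                simp only [Option.map_some]
                rw [if_pos hk1, if_neg hk]
                simp only [Option.some.injEq, Prod.mk.injEq, psum]
                refine ⟨?_, ?_, ?_⟩ <;> (try trivial) <;> (push_cast [List.length_cons]; omega)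
          · simp only [if_neg hc]
            by_cases hk : PySem.Int.mod k 2 = 0
            · have hk1 : ¬ PySem.Int.mod (k + 1) 2 = 0 := by rw [hmod1]; rw [hmod] at hk; omega
              rw [if_pos hk, ih (r - 1 + 1 - l).toNat (by omega) l (r - 1) (se + cr) so (k + 1) rfl]
              cases picks? cards l (r - 1) with
              | none => simp
              | some ps =>
                simp only [Option.map_some]
                rw [if_neg hk1, if_pos hk]
                simp only [Option.some.injEq, Prod.mk.injEq, psum]
                refine ⟨?_, ?_, ?_⟩ <;> (try trivial) <;> (push_cast [List.length_cons]; omega)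
            · have hk1 : PySem.Int.mod (k + 1) 2 = 0 := by rw [hmod1]; rw [hmod] at hk; omega
              rw [if_neg hk, ih (r - 1 + 1 - l).toNat (by omega) l (r - 1) se (so + cr) (k + 1) rfl]
              cases picks? cards l (r - 1) with
              | none => simp
              | some ps =>
                simp only [Option.map_some]
                rw [if_pos hk1, if_neg hk]
                simp only [Option.some.injEq, Prod.mk.injEq, psum]
                refine ⟨?_, ?_, ?_⟩ <;> (try trivial) <;> (push_cast [List.length_cons]; omega)
    · simp only [dif_neg hlr, Option.map_some]
      split_ifs <;> simp [psum]

-- Under Pre_'s bounds picks? succeeds and has length (r + 1 - l).toNat.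
theorem picks?_some (cards : List Int) : ∀ (N : Nat) (l r : Int), (r + 1 - l).toNat = N →
    -(cards.length : Int) ≤ l → r < (cards.length : Int) →
    ∃ ps : List Int, picks? cards l r = some ps ∧ ps.length = (r + 1 - l).toNat := by
  intro N
  induction N using Nat.strong_induction_on with
  | _ N ih =>
    intro l r hN hl hr
    rw [picks?]
    by_cases hlr : l ≤ r
    · obtain ⟨kl, hkl, hkl2⟩ := idx_ok (n := cards.length) (i := l) ⟨hl, by omega⟩
      obtain ⟨kr, hkr, hkr2⟩ := idx_ok (n := cards.length) (i := r) ⟨by omega, hr⟩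
      rw [dif_pos hlr, pyGet?_eq_some hkl hkl2, pyGet?_eq_some hkr hkr2]
      dsimp only
      by_cases hc : cards.getD kl 0 ≥ cards.getD kr 0
      · obtain ⟨ps, hps, hlen⟩ := ih (r + 1 - (l + 1)).toNat (by omega) (l + 1) r rfl (by omega) hr
        exact ⟨_, by rw [if_pos hc, hps]; rfl, by simp [hlen]; omega⟩
      · obtain ⟨ps, hps, hlen⟩ := ih (r - 1 + 1 - l).toNat (by omega) l (r - 1) rfl hl (by omega)
        exact ⟨_, by rw [if_neg hc, hps]; rfl, by simp [hlen]; omega⟩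
    · exact ⟨[], by rw [dif_neg hlr], by simp only [List.length_nil]; omega⟩

-- A equals the abstract alternation over the pick sequence.
theorem func_eq_applyAlt (cards : List Int) : ∀ (N : Nat) (l r turn : Int) (score : List Int),
    (r + 1 - l).toNat = N →
    (l ≤ r → -(cards.length : Int) ≤ l ∧ r < (cards.length : Int) ∧
      PySem.Raise.InRange score.length turn ∧
      (l < r → PySem.Raise.InRange score.length (1 - turn))) →
    ∃ ps : List Int, picks? cards l r = some ps ∧
      func cards turn score l r = applyAlt score turn ps := by
  intro N
  induction N using Nat.strong_induction_on with
  | _ N ih =>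
    intro l r turn score hN hpre
    rw [func, picks?]
    by_cases hlr : l ≤ r
    · obtain ⟨hl, hr, ht, ht2⟩ := hpre hlr
      obtain ⟨kl, hkl, hkl2⟩ := idx_ok (n := cards.length) (i := l) ⟨hl, by omega⟩
      obtain ⟨kr, hkr, hkr2⟩ := idx_ok (n := cards.length) (i := r) ⟨by omega, hr⟩
      obtain ⟨kt, hkt, hkt2⟩ := idx_ok (n := score.length) (i := turn) ht
      rw [dif_neg (by omega : ¬ l > r), dif_pos hlr,
          pyGet?_eq_some hkl hkl2, pyGet?_eq_some hkr hkr2, pyGet?_eq_some hkt hkt2]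
      dsimp only
      have hturn : 1 - (1 - turn) = turn := by ring
      by_cases hc : cards.getD kl 0 ≥ cards.getD kr 0
      · rw [if_pos hc, if_pos hc, pySetD_eq _ hkt]
        have hlen : (score.set kt (score.getD kt 0 + cards.getD kl 0)).length = score.length :=
          List.length_set ..
        by_cases hlr2 : l + 1 ≤ r
        · obtain ⟨ps, hps, hfa⟩ := ih (r + 1 - (l + 1)).toNat (by omega) (l + 1) r (1 - turn)
            (score.set kt (score.getD kt 0 + cards.getD kl 0)) rfl
            (fun h2 => ⟨by omega, hr, by rw [hlen]; exact ht2 (by omega),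
              fun h3 => by rw [hlen, hturn]; exact ht⟩)
          refine ⟨_, by rw [hps]; rfl, ?_⟩
          rw [hfa, applyAlt]
          congr 1
          rw [pySetD_eq _ hkt]
          congr 2
          simp [PySem.List.pyGetD, pyGet?_eq_some hkt hkt2]
        · obtain ⟨ps, hps, hfa⟩ := ih (r + 1 - (l + 1)).toNat (by omega) (l + 1) r (1 - turn)
            (score.set kt (score.getD kt 0 + cards.getD kl 0)) rfl (fun h2 => absurd h2 hlr2)
          refine ⟨_, by rw [hps]; rfl, ?_⟩
          rw [hfa, applyAlt]
          congr 1
          rw [pySetD_eq _ hkt]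
          congr 2
          simp [PySem.List.pyGetD, pyGet?_eq_some hkt hkt2]
      · rw [if_neg hc, if_neg hc, pySetD_eq _ hkt]
        have hlen : (score.set kt (score.getD kt 0 + cards.getD kr 0)).length = score.length :=
          List.length_set ..
        by_cases hlr2 : l ≤ r - 1
        · obtain ⟨ps, hps, hfa⟩ := ih (r - 1 + 1 - l).toNat (by omega) l (r - 1) (1 - turn)
            (score.set kt (score.getD kt 0 + cards.getD kr 0)) rfl
            (fun h2 => ⟨hl, by omega, by rw [hlen]; exact ht2 (by omega),
              fun h3 => by rw [hlen, hturn]; exact ht⟩)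
          refine ⟨_, by rw [hps]; rfl, ?_⟩
          rw [hfa, applyAlt]
          congr 1
          rw [pySetD_eq _ hkt]
          congr 2
          simp [PySem.List.pyGetD, pyGet?_eq_some hkt hkt2]
        · obtain ⟨ps, hps, hfa⟩ := ih (r - 1 + 1 - l).toNat (by omega) l (r - 1) (1 - turn)
            (score.set kt (score.getD kt 0 + cards.getD kr 0)) rfl (fun h2 => absurd h2 hlr2)
          refine ⟨_, by rw [hps]; rfl, ?_⟩
          rw [hfa, applyAlt]
          congr 1
          rw [pySetD_eq _ hkt]
          congr 2
          simp [PySem.List.pyGetD, pyGet?_eq_some hkt hkt2]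
    · exact ⟨[], by rw [dif_neg hlr], by rw [dif_pos (by omega : l > r)]; rfl⟩

-- Nat-index view of "add v to slot k in place".
def addAt (s : List Int) (k : Nat) (v : Int) : List Int := s.set k (s.getD k 0 + v)

def applyAltN (s : List Int) (i j : Nat) : List Int → List Int
  | [] => s
  | p :: ps => applyAltN (addAt s i p) j i ps

theorem length_addAt (s : List Int) (k : Nat) (v : Int) : (addAt s k v).length = s.length :=
  List.length_set ..

theorem addAt_comm (s : List Int) (i j : Nat) (x y : Int) :
    addAt (addAt s i x) j y = addAt (addAt s j y) i x := by
  unfold addAt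
  apply List.ext_getElem
  · simp
  · intro m hm1 hm2
    simp only [List.getElem_set, List.getD_eq_getElem?_getD, List.getElem?_set]
    by_cases hij : i = j <;> by_cases him : i = m <;> by_cases hjm : j = m <;>
      simp_all <;> split_ifs <;> simp_all <;> ring

theorem addAt_merge (s : List Int) (i : Nat) (x y : Int) :
    addAt (addAt s i x) i y = addAt s i (x + y) := by
  unfold addAt
  apply List.ext_getElem
  · simp
  · intro m hm1 hm2
    simp only [List.getElem_set, List.getD_eq_getElem?_getD, List.getElem?_set]
    by_cases him : i = m <;> split_ifs <;> simp_all <;> ring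

theorem addAt_zero (s : List Int) (j : Nat) (hj : j < s.length) : addAt s j 0 = s := by
  unfold addAt
  apply List.ext_getElem
  · simp
  · intro m hm1 hm2
    simp only [List.getElem_set]
    split_ifs with h
    · subst h; simp [List.getD_eq_getElem?_getD, List.getElem?_eq_getElem hj]
    · rfl

-- The alternation, at fixed Nat indices, equals the two batched additions.
theorem applyAltN_eq : ∀ (ps : List Int) (s : List Int) (i j : Nat) (p : Int),
    i < s.length → j < s.length →
    applyAltN s i j (p :: ps) = addAt (addAt s i (p + psum false ps)) j (psum true ps) := by
  intro ps
  induction ps with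
  | nil =>
    intro s i j p hi hj
    show addAt s i p = addAt (addAt s i (p + psum false [])) j (psum true [])
    rw [show psum false [] = 0 from rfl, show psum true [] = 0 from rfl, add_zero,
      addAt_zero _ j (by rw [length_addAt]; exact hj)]
  | cons q qs ih =>
    intro s i j p hi hj
    show applyAltN (addAt s i p) j i (q :: qs)
        = addAt (addAt s i (p + psum false (q :: qs))) j (psum true (q :: qs))
    rw [ih (addAt s i p) j i q (by rw [length_addAt]; exact hj) (by rw [length_addAt]; exact hi),
      addAt_comm, addAt_merge,
      show psum false (q :: qs) = psum true qs from rfl,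
      show psum true (q :: qs) = q + psum false qs from rfl]

-- A's alternation is the Nat-index alternation once the two Python indices are resolved.
theorem applyAlt_eq_applyAltN : ∀ (ps : List Int) (score : List Int) (turn : Int) (i j : Nat),
    PySem.List.pyIdx? score.length turn = some i → i < score.length →
    PySem.List.pyIdx? score.length (1 - turn) = some j → j < score.length →
    applyAlt score turn ps = applyAltN score i j ps := by
  intro ps
  induction ps with
  | nil => intro score turn i j _ _ _ _; rfl
  | cons p ps ih =>
    intro score turn i j hi hi2 hj hj2
    rw [applyAlt, applyAltN]
    have hg : PySem.List.pyGetD score turn 0 = score.getD i 0 := by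
      simp [PySem.List.pyGetD, pyGet?_eq_some hi hi2]
    rw [pySetD_eq _ hi, hg]
    have hlen : (score.set i (score.getD i 0 + p)).length = score.length := List.length_set ..
    have hturn : 1 - (1 - turn) = turn := by ring
    exact ih (score.set i (score.getD i 0 + p)) (1 - turn) j i
      (by rw [hlen]; exact hj) (by rw [hlen]; exact hj2)
      (by rw [hlen, hturn]; exact hi) (by rw [hlen]; exact hi2)

-- B's finish, with at least two picks, is the two batched additions.
theorem finish_eq (score : List Int) (turn se so k : Int) (i j : Nat)
    (hk : 1 < k)
    (hi : PySem.List.pyIdx? score.length turn = some i) (hi2 : i < score.length)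
    (hj : PySem.List.pyIdx? score.length (1 - turn) = some j) (hj2 : j < score.length) :
    finish score turn se so k = addAt (addAt score i se) j so := by
  have h1 : finish1 score turn se k = addAt score i se := by
    unfold finish1
    rw [if_pos (by omega : k > 0), pyGet?_eq_some hi hi2]
    dsimp only
    rw [pySetD_eq _ hi]
    rfl
  unfold finish finish2
  rw [h1, if_pos (by omega : k > 1)]
  have hlen : (addAt score i se).length = score.length := length_addAt ..
  have hj' : PySem.List.pyIdx? (addAt score i se).length (1 - turn) = some j := by
    rw [hlen]; exact hj
  rw [pyGet?_eq_some hj' (by rw [hlen]; exact hj2)]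
  dsimp only
  rw [pySetD_eq _ hj']
  rfl

-- A's alternation equals B's batched finish (nonempty pick list).
theorem applyAlt_eq_finish : ∀ (ps : List Int) (score : List Int) (turn p : Int),
    PySem.Raise.InRange score.length turn →
    (ps ≠ [] → PySem.Raise.InRange score.length (1 - turn)) →
    applyAlt score turn (p :: ps)
      = finish score turn (psum true (p :: ps)) (psum false (p :: ps)) ((p :: ps).length : Int) := by
  intro ps score turn p ht ht2
  obtain ⟨kt, hkt, hkt2⟩ := idx_ok ht
  cases ps with
  | nil =>
    rw [applyAlt, applyAlt]
    unfold finish finish2 finish1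
    simp only [List.length_cons, List.length_nil, Nat.zero_add, Nat.cast_one]
    rw [if_neg (show ¬ ((1:Int) > 1) by omega), if_pos (show (1:Int) > 0 by omega),
        pyGet?_eq_some hkt hkt2]
    dsimp only
    rw [pySetD_eq _ hkt, pySetD_eq _ hkt]
    have hg : PySem.List.pyGetD score turn 0 = score.getD kt 0 := by
      simp [PySem.List.pyGetD, pyGet?_eq_some hkt hkt2]
    rw [hg, show psum true [p] = p + 0 from rfl, add_zero]
  | cons q qs =>
    obtain ⟨ku, hku, hku2⟩ := idx_ok (ht2 (by simp))
    rw [applyAlt_eq_applyAltN (p :: q :: qs) score turn kt ku hkt hkt2 hku hku2,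
      applyAltN_eq (q :: qs) score kt ku p hkt2 hku2,
      finish_eq score turn _ _ _ kt ku (by push_cast [List.length_cons]; omega) hkt hkt2 hku hku2,
      show psum true (p :: q :: qs) = p + psum false (q :: qs) from rfl,
      show psum false (p :: q :: qs) = psum true (q :: qs) from rfl]

-- ===== VERDICT (by name: the statement is the Claim_ definition above) =====
theorem func_spec : Claim_equal_func := by
  intro cards turn score l r _hdom hpre
  unfold Spec_func func_alt
  rw [pickLoop_eq cards (r + 1 - l).toNat l r 0 0 0 rfl]
  by_cases hlr : l ≤ r
  · obtain ⟨hl, hr, ht, ht2⟩ : -(cards.length : Int) ≤ l ∧ r < (cards.length : Int) ∧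
        PySem.Raise.InRange score.length turn ∧
        (r = l ∨ PySem.Raise.InRange score.length (1 - turn)) := by
      rcases hpre with h | h
      · omega
      · exact h
    obtain ⟨ps, hps, hfa⟩ := func_eq_applyAlt cards (r + 1 - l).toNat l r turn score rfl
      (fun _ => ⟨hl, hr, ht, fun h3 => ht2.resolve_left (by omega)⟩)
    obtain ⟨ps', hps', hlen⟩ := picks?_some cards (r + 1 - l).toNat l r rfl hl hr
    have hpp : ps = ps' := by
      rw [hps'] at hps
      exact (Option.some.injEq ..).mp hps.symm
    subst hpp
    rw [hps', hfa]
    have hne : ps ≠ [] := by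
      intro h
      rw [h] at hlen
      simp at hlen
      omega
    obtain ⟨p, qs, rfl⟩ : ∃ p qs, ps = p :: qs := by
      cases ps with
      | nil => exact absurd rfl hne
      | cons a b => exact ⟨a, b, rfl⟩
    have ht2' : qs ≠ [] → PySem.Raise.InRange score.length (1 - turn) := by
      intro hq
      refine ht2.resolve_left ?_
      intro hrl
      have : (p :: qs).length = 1 := by rw [hlen]; omega
      simp at this
      exact hq this
    rw [applyAlt_eq_finish qs score turn p ht ht2']
    simp only [Option.map_some]
    rw [if_pos (show PySem.Int.mod 0 2 = 0 by decide)]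
    simp
  · rw [picks?, dif_neg hlr]
    simp only [Option.map_some]
    rw [func, dif_pos (by omega : l > r)]
    rw [if_pos (show PySem.Int.mod 0 2 = 0 by decide)]
    simp [finish, finish1, finish2]
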